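-- pv_equiv track=rewrite | github.com/andreafortuna/malhunt | src/malhunt/utils.py | fix_duplicated_rules
-- ===== SOURCE A (Python) =====
-- def fix_duplicated_rules(content: str) -> str:
--     """Remove duplicate rule definitions from merged YARA content.
--
--     Args:
--         content: Merged YARA rules content
--
--     Returns:
--         Cleaned content with duplicates removed
--     """
--     lines = content.split('\n')
--     filtered = []
--     first_elf = True
--     skip_block = False
--
--     for line in lines:
--         if line.strip() == "private rule is__elf {":
--             if first_elf:
--                 first_elf = False
--                 filtered.append(line)
--             else:
--                 skip_block = True
--         elif skip_block and line.strip() == "}":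
--             skip_block = False
--         elif not skip_block:
--             filtered.append(line)
--
--     return '\n'.join(filtered)
-- ===== SOURCE B (Python) =====
-- def fix_duplicated_rules(content: str) -> str:
--     """Remove duplicate rule definitions from merged YARA content.
--
--     Two-phase index walk: copy lines up to and including the first
--     'private rule is__elf {' opener; after that, each further opener
--     starts an inner skip that advances past everything up to and
--     including the next '}' line.
--     """
--     OPEN = "private rule is__elf {"
--     lines = content.split('\n')
--     n = len(lines)
--     out = []
--     i = 0
--     while i < n and lines[i].strip() != OPEN:
--         out.append(lines[i])
--         i += 1
--     if i < n:
--         out.append(lines[i])  # keep the first opener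
--         i += 1
--         while i < n:
--             if lines[i].strip() == OPEN:
--                 i += 1
--                 while i < n and lines[i].strip() != "}":
--                     i += 1
--                 i += 1  # drop the closing '}' too (or run off the end)
--             else:
--                 out.append(lines[i])
--                 i += 1
--     return '\n'.join(out)
-- ===== Notes on version B (the rewrite author's own statement) =====
-- stated objective: alternative
-- what changed: Replaces A's single scan driven by first_elf/skip_block boolean flags with a two-phase index walk: copy lines up to and including the first elf-rule opener, then a loop whose inner skip loop advances past each duplicate block up to and including its '}' closer.
import Mathlib
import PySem

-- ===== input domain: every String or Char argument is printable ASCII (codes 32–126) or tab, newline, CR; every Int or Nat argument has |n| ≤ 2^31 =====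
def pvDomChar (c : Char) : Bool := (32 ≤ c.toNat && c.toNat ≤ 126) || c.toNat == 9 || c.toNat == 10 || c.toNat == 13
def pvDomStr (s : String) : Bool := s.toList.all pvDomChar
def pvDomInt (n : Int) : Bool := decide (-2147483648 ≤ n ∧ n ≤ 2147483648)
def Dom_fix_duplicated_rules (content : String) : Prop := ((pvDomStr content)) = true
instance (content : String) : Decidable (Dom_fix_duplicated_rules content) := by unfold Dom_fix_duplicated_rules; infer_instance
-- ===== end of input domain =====

-- B replaces A's single scan with running first_elf/skip_block flags by a two-phase
-- index walk (copy-until-first-opener, then an inner skip loop per duplicate block);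
-- objective: alternative decomposition, same linear cost.

-- ===== PORT A =====
-- A's loop body: state is (filtered, first_elf, skip_block)
def pvStepA (st : List String × Bool × Bool) (line : String) : List String × Bool × Bool :=
  let (filtered, first_elf, skip_block) := st
  if PySem.Str.strip line = "private rule is__elf {" then
    if first_elf then (filtered ++ [line], false, skip_block)
    else (filtered, first_elf, true)
  else if skip_block && (PySem.Str.strip line = "}") then
    (filtered, first_elf, false)
  else if !skip_block then (filtered ++ [line], first_elf, skip_block)
  else (filtered, first_elf, skip_block)

def fix_duplicated_rules (content : String) : String :=
  let lines := (PySem.Str.split? content "\n").getD []  -- sep "\n" ≠ "", so split? = Python's split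
  let st := lines.foldl pvStepA ([], true, false)
  PySem.Str.join "\n" st.1

-- ===== PORT B =====
-- B's innermost while: advance past lines up to and including the next '}' line
def pvDropB : List String → List String
  | [] => []
  | l :: ls => if PySem.Str.strip l = "}" then ls else pvDropB ls

theorem pvDropB_length_le : ∀ ls, (pvDropB ls).length ≤ ls.length := by
  intro ls
  induction ls with
  | nil => simp [pvDropB]
  | cons l ls ih =>
      simp only [pvDropB]
      split
      · simp
      · exact Nat.le_succ_of_le ih

-- B's second while loop (after the first opener was emitted)
def pvAfterB : List String → List String
  | [] => []
  | l :: ls =>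
      if PySem.Str.strip l = "private rule is__elf {" then pvAfterB (pvDropB ls)
      else l :: pvAfterB ls
termination_by ls => ls.length
decreasing_by
  · exact Nat.lt_succ_of_le (pvDropB_length_le ls)
  · simp

-- B's first while loop: copy until the first opener, keep it, hand over to pvAfterB
def pvPhase1B : List String → List String
  | [] => []
  | l :: ls =>
      if PySem.Str.strip l = "private rule is__elf {" then l :: pvAfterB ls
      else l :: pvPhase1B ls

def fix_duplicated_rules_alt (content : String) : String :=
  PySem.Str.join "\n" (pvPhase1B ((PySem.Str.split? content "\n").getD []))

-- ===== PRECONDITION & SPEC =====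
def Spec_fix_duplicated_rules (content : String) (out : String) : Prop := out = fix_duplicated_rules_alt content
instance (content : String) (out : String) : Decidable (Spec_fix_duplicated_rules content out) := by unfold Spec_fix_duplicated_rules; infer_instance

-- ===== CLAIM (what is proved, stated in full; the proofs are below) =====
def Claim_equal_fix_duplicated_rules : Prop := ∀ (content : String), Dom_fix_duplicated_rules content → Spec_fix_duplicated_rules content (fix_duplicated_rules content)

-- ===== LEMMAS AND PROOFS =====

-- step lemmas: how A's loop body acts in each flag state
theorem pvStepA_open_first (acc : List String) (sk : Bool) (l : String)
    (h : PySem.Str.strip l = "private rule is__elf {") :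
    pvStepA (acc, true, sk) l = (acc ++ [l], false, sk) := by simp [pvStepA, h]

theorem pvStepA_open_rest (acc : List String) (sk : Bool) (l : String)
    (h : PySem.Str.strip l = "private rule is__elf {") :
    pvStepA (acc, false, sk) l = (acc, false, true) := by simp [pvStepA, h]

theorem pvStepA_close_skip (acc : List String) (fe : Bool) (l : String)
    (h2 : PySem.Str.strip l = "}") :
    pvStepA (acc, fe, true) l = (acc, fe, false) := by simp [pvStepA, h2]

theorem pvStepA_other_skip (acc : List String) (fe : Bool) (l : String)
    (h1 : ¬ PySem.Str.strip l = "private rule is__elf {") (h2 : ¬ PySem.Str.strip l = "}") :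
    pvStepA (acc, fe, true) l = (acc, fe, true) := by simp [pvStepA, h1, h2]

theorem pvStepA_other_noskip (acc : List String) (fe : Bool) (l : String)
    (h1 : ¬ PySem.Str.strip l = "private rule is__elf {") :
    pvStepA (acc, fe, false) l = (acc ++ [l], fe, false) := by simp [pvStepA, h1]

-- A's fold in skip_block state = A's fold after B's drop-to-closer, in normal state
theorem pvFoldA_skip (ls : List String) : ∀ acc : List String,
    (List.foldl pvStepA (acc, false, true) ls).1
      = (List.foldl pvStepA (acc, false, false) (pvDropB ls)).1 := by
  induction ls with
  | nil => intro acc; simp [pvDropB]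
  | cons l ls ih =>
      intro acc
      by_cases hop : PySem.Str.strip l = "private rule is__elf {"
      · have hne : ¬ PySem.Str.strip l = "}" := by simp [hop]
        rw [List.foldl_cons, pvStepA_open_rest _ _ _ hop]
        rw [show pvDropB (l :: ls) = pvDropB ls from by simp [pvDropB, hne]]
        exact ih acc
      · by_cases hcl : PySem.Str.strip l = "}"
        · rw [List.foldl_cons, pvStepA_close_skip _ _ _ hcl]
          rw [show pvDropB (l :: ls) = ls from by simp [pvDropB, hcl]]
        · rw [List.foldl_cons, pvStepA_other_skip _ _ _ hop hcl]
          rw [show pvDropB (l :: ls) = pvDropB ls from by simp [pvDropB, hcl]]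
          exact ih acc

-- A's fold in the (first_elf = false, skip_block = false) state appends pvAfterB
theorem pvFoldA_after (ls : List String) : ∀ acc : List String,
    (List.foldl pvStepA (acc, false, false) ls).1 = acc ++ pvAfterB ls := by
  induction hls : ls.length using Nat.strongRecOn generalizing ls with
  | _ n ih =>
    intro acc
    match ls with
    | [] => simp [pvAfterB]
    | l :: ls' =>
        by_cases hop : PySem.Str.strip l = "private rule is__elf {"
        · have h1 : (pvDropB ls').length < n := by
            have := pvDropB_length_le ls'
            simp at hls; omega
          rw [List.foldl_cons, pvStepA_open_rest _ _ _ hop, pvFoldA_skip,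
            ih _ h1 _ rfl]
          rw [show pvAfterB (l :: ls') = pvAfterB (pvDropB ls') from by
            simp [pvAfterB, hop]]
        · have h1 : ls'.length < n := by simp at hls; omega
          rw [List.foldl_cons, pvStepA_other_noskip _ _ _ hop, ih _ h1 _ rfl]
          rw [show pvAfterB (l :: ls') = l :: pvAfterB ls' from by
            simp [pvAfterB, hop]]
          simp

-- A's fold from the initial state is B's phase-1 walk
theorem pvFoldA_first (ls : List String) : ∀ acc : List String,
    (List.foldl pvStepA (acc, true, false) ls).1 = acc ++ pvPhase1B ls := by
  induction ls with
  | nil => intro acc; simp [pvPhase1B]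
  | cons l ls ih =>
      intro acc
      by_cases hop : PySem.Str.strip l = "private rule is__elf {"
      · rw [List.foldl_cons, pvStepA_open_first _ _ _ hop, pvFoldA_after]
        simp [pvPhase1B, hop]
      · rw [List.foldl_cons, pvStepA_other_noskip _ _ _ hop, ih]
        simp [pvPhase1B, hop]

-- ===== VERDICT (by name: the statement is the Claim_ definition above) =====
theorem fix_duplicated_rules_spec : Claim_equal_fix_duplicated_rules := by
  intro content _
  show fix_duplicated_rules content = fix_duplicated_rules_alt content
  show PySem.Str.join "\n"
      (List.foldl pvStepA ([], true, false) ((PySem.Str.split? content "\n").getD [])).1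
    = fix_duplicated_rules_alt content
  rw [pvFoldA_first]
  rfl
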